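-- pv_equiv track=rewrite | github.com/PanakIllustrations/Tic-Tac-Toe-for-Constrained-Instruction-Sets | TicTacToeDemo.py | float_and_operation
-- ===== SOURCE A (Python) =====
-- import math
--
-- def float_get_bit(bb, i):
--     return math.floor(bb / 2 ** i) % 2
--
-- def float_and_operation(bb, m):
--     result = 0
--     v11 = 0
--     while v11 < 9:
--         b1 = float_get_bit(bb, v11)
--         b2 = float_get_bit(m, v11)
--         if b1 == 1 and b2 == 1:
--             result += 2 ** v11
--         v11 += 1
--     return result
-- ===== SOURCE B (Python) =====
-- def float_and_operation(bb, m):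
--     import math
--     return math.floor(bb) % 512 & math.floor(m) % 512
-- ===== Notes on version B (the rewrite author's own statement) =====
-- stated objective: simpler
-- what changed: Replaces the 9-iteration per-bit floor/mod accumulation loop with the closed form (floor(bb) % 512) & (floor(m) % 512): one reduction modulo 2^9 of each argument followed by a single native bitwise AND, no loop and no per-bit helper.
import Mathlib
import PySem

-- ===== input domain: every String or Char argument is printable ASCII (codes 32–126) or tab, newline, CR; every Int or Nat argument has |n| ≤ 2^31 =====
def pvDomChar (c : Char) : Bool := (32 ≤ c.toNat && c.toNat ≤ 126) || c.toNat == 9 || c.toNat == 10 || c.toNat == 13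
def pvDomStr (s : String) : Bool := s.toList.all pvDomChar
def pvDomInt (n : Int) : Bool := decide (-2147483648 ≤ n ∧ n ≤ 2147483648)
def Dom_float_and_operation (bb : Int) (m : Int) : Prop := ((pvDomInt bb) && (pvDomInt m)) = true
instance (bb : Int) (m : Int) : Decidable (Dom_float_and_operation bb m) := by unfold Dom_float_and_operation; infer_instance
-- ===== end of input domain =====

-- B replaces the 9-iteration per-bit accumulation loop by the closed form (bb % 512) & (m % 512): simpler, one native bitwise AND.


-- ===== PORT A =====
-- math.floor(bb / 2 ** i) % 2: for integer bb, 2**i a power of two, the float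
-- division is exact, so this is floor division followed by Python's % (exact here).
def float_get_bit (bb : Int) (i : Nat) : Int :=
  PySem.Int.mod (PySem.Int.floordiv bb (2 ^ i)) 2

def faLoop (bb m : Int) (v11 : Nat) (result : Int) : Int :=
  if v11 < 9 then
    let b1 := float_get_bit bb v11
    let b2 := float_get_bit m v11
    faLoop bb m (v11 + 1) (if b1 = 1 ∧ b2 = 1 then result + 2 ^ v11 else result)
  else result
termination_by 9 - v11

def float_and_operation (bb : Int) (m : Int) : Int := faLoop bb m 0 0

-- ===== PORT B =====
def float_and_operation_alt (bb : Int) (m : Int) : Int :=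
  PySem.Int.band (PySem.Int.mod bb 512) (PySem.Int.mod m 512)

-- ===== PRECONDITION & SPEC =====
def Spec_float_and_operation (bb : Int) (m : Int) (out : Int) : Prop := out = float_and_operation_alt bb m
instance (bb : Int) (m : Int) (out : Int) : Decidable (Spec_float_and_operation bb m out) := by unfold Spec_float_and_operation; infer_instance

-- ===== CLAIM (what is proved, stated in full; the proofs are below) =====
def Claim_equal_float_and_operation : Prop := ∀ (bb : Int) (m : Int), Dom_float_and_operation bb m → Spec_float_and_operation bb m (float_and_operation bb m)

-- ===== LEMMAS AND PROOFS =====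

-- bit i (i < 9) of the loop only depends on the argument modulo 512
lemma bit_emod (bb : Int) (i : Nat) (h : i < 9) :
    float_get_bit bb i = float_get_bit (bb % 512) i := by
  have h2 : (0:Int) < 2 ^ i := by positivity
  unfold float_get_bit
  rw [PySem.Int.floordiv_eq_ediv_of_pos h2, PySem.Int.floordiv_eq_ediv_of_pos h2,
      PySem.Int.mod_eq_emod_of_pos (by norm_num), PySem.Int.mod_eq_emod_of_pos (by norm_num)]
  conv_lhs => rw [← Int.emod_add_mul_ediv bb 512]
  have hpow : (2:Int) ^ (8 - i) * 2 ^ i = 2 ^ 8 := by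
    rw [← pow_add]; congr 1; omega
  have h512 : (512:Int) * (bb / 512) = 2 * (2 ^ (8 - i) * (bb / 512)) * 2 ^ i := by
    have hr : 2 * (2 ^ (8 - i) * (bb / 512)) * 2 ^ i = 2 * (2 ^ (8 - i) * 2 ^ i) * (bb / 512) := by ring
    rw [hr, hpow]; norm_num
  rw [h512, Int.add_mul_ediv_right _ _ (ne_of_gt h2), Int.add_mul_emod_self_left]

lemma faLoop_emod (bb m : Int) : ∀ (k v : Nat) (r : Int), 9 - v ≤ k →
    faLoop bb m v r = faLoop (bb % 512) (m % 512) v r := by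
  intro k
  induction k with
  | zero =>
    intro v r h
    have hv : ¬ v < 9 := by omega
    rw [faLoop]
    conv_rhs => rw [faLoop]
    simp [hv]
  | succ k ih =>
    intro v r h
    by_cases hv : v < 9
    · rw [faLoop]
      conv_rhs => rw [faLoop]
      simp only [hv, if_true]
      rw [← bit_emod bb v hv, ← bit_emod m v hv]
      exact ih (v + 1) _ (by omega)
    · rw [faLoop]
      conv_rhs => rw [faLoop]
      simp [hv]

-- float_get_bit on a natural-number cast computes the Nat-level bit
lemma float_get_bit_natCast (a : Nat) (v : Nat) :
    float_get_bit ((a : Int)) v = ((a / 2 ^ v % 2 : Nat) : Int) := by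
  unfold float_get_bit
  rw [show ((2:Int) ^ v) = ((2 ^ v : Nat) : Int) by push_cast; ring,
      show ((2:Int)) = ((2 : Nat) : Int) from rfl]
  rw [PySem.Int.floordiv_natCast, PySem.Int.mod_natCast]

-- the bit of the AND is the AND of the bits, in div/mod form
lemma and_bit (a b v : Nat) :
    (a &&& b) / 2 ^ v % 2 = (if a / 2 ^ v % 2 = 1 ∧ b / 2 ^ v % 2 = 1 then 1 else 0) := by
  have key : ∀ n : Nat, (n.testBit v = true) ↔ (n / 2 ^ v % 2 = 1) := by
    intro n; rw [Nat.testBit, Nat.shiftRight_eq_div_pow]; simp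
  have h := Nat.testBit_land a b v
  by_cases hcond : a / 2 ^ v % 2 = 1 ∧ b / 2 ^ v % 2 = 1
  · rw [if_pos hcond]
    have ht : (a &&& b).testBit v = true := by
      rw [h, Bool.and_eq_true, key, key]; exact hcond
    rw [key] at ht; exact ht
  · rw [if_neg hcond]
    have ht : ¬ ((a &&& b).testBit v = true) := by
      rw [h, Bool.and_eq_true, key, key]; exact hcond
    rw [key] at ht
    omega

-- loop invariant on nonnegative inputs below 512
lemma faLoop_inv (a b : Nat) (ha : a < 512) (_hb : b < 512) :
    ∀ (k v : Nat) (r : Int), 9 - v ≤ k →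
    faLoop (↑a) (↑b) v r = r + ↑((a &&& b) / 2 ^ v * 2 ^ v) := by
  have hc : a &&& b < 512 := Nat.lt_of_le_of_lt Nat.and_le_left ha
  have hdone : ∀ (v : Nat), ¬ v < 9 → ∀ r : Int,
      faLoop (↑a) (↑b) v r = r + ↑((a &&& b) / 2 ^ v * 2 ^ v) := by
    intro v hv r
    rw [faLoop]
    have hlt : a &&& b < 2 ^ v := by
      calc a &&& b < 512 := hc
        _ = 2 ^ 9 := by norm_num
        _ ≤ 2 ^ v := Nat.pow_le_pow_right (by norm_num) (by omega)
    rw [Nat.div_eq_of_lt hlt]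
    simp [hv]
  intro k
  induction k with
  | zero =>
    intro v r h
    exact hdone v (by omega) r
  | succ k ih =>
    intro v r h
    by_cases hv : v < 9
    · rw [faLoop]
      simp only [hv, if_true]
      rw [float_get_bit_natCast, float_get_bit_natCast]
      rw [ih (v + 1) _ (by omega)]
      have hsplit : (a &&& b) / 2 ^ v * 2 ^ v
          = (a &&& b) / 2 ^ (v + 1) * 2 ^ (v + 1)
            + (if a / 2 ^ v % 2 = 1 ∧ b / 2 ^ v % 2 = 1 then 1 else 0) * 2 ^ v := by
      -- split the partial sum at bit v
        rw [← and_bit a b v]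
        have hdd : (a &&& b) / 2 ^ v / 2 = (a &&& b) / 2 ^ (v + 1) := by
          rw [Nat.div_div_eq_div_mul, ← pow_succ]
        conv_lhs => rw [← Nat.div_add_mod ((a &&& b) / 2 ^ v) 2]
        rw [← hdd, pow_succ]
        ring
      by_cases hcond : a / 2 ^ v % 2 = 1 ∧ b / 2 ^ v % 2 = 1
      · have hca : ((a / 2 ^ v % 2 : Nat) : Int) = 1 ∧ ((b / 2 ^ v % 2 : Nat) : Int) = 1 :=
          ⟨by exact_mod_cast hcond.1, by exact_mod_cast hcond.2⟩
        rw [if_pos hca, hsplit, if_pos hcond]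
        push_cast
        ring
      · have hca : ¬ (((a / 2 ^ v % 2 : Nat) : Int) = 1 ∧ ((b / 2 ^ v % 2 : Nat) : Int) = 1) := by
          intro hx
          exact hcond ⟨by exact_mod_cast hx.1, by exact_mod_cast hx.2⟩
        rw [if_neg hca, hsplit, if_neg hcond]
        push_cast
        ring
    · exact hdone v hv r

-- ===== VERDICT (by name: the statement is the Claim_ definition above) =====
theorem float_and_operation_spec : Claim_equal_float_and_operation := by
  intro bb m _
  unfold Spec_float_and_operation float_and_operation float_and_operation_alt
  rw [faLoop_emod bb m 9 0 0 (by omega)]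
  have hbb : (0:Int) ≤ bb % 512 := Int.emod_nonneg _ (by norm_num)
  have hmm : (0:Int) ≤ m % 512 := Int.emod_nonneg _ (by norm_num)
  have hbb' : bb % 512 < 512 := Int.emod_lt_of_pos _ (by norm_num)
  have hmm' : m % 512 < 512 := Int.emod_lt_of_pos _ (by norm_num)
  have ha : (bb % 512).toNat < 512 := by omega
  have hb : (m % 512).toNat < 512 := by omega
  rw [PySem.Int.mod_eq_emod_of_pos (show (0:Int) < 512 by norm_num),
      PySem.Int.mod_eq_emod_of_pos (show (0:Int) < 512 by norm_num),
      PySem.Int.band_of_nonneg hbb hmm]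
  rw [show bb % 512 = (((bb % 512).toNat : Nat) : Int) from (Int.toNat_of_nonneg hbb).symm,
      show m % 512 = (((m % 512).toNat : Nat) : Int) from (Int.toNat_of_nonneg hmm).symm]
  rw [faLoop_inv _ _ ha hb 9 0 0 (by omega)]
  simp
  rw [max_eq_left hbb, max_eq_left hmm]
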